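-- pv_equiv track=rewrite | github.com/AmiSharabi/mcp_text2sql | src/db_connection.py | _resolve_default_name
-- ===== SOURCE A (Python) =====
-- def _resolve_default_name(
--     requested: str | None,
--     profiles: dict[str, dict[str, str]],
-- ) -> str:
--     # Resolve configured default profile name by profile key or database name.
--     if not profiles:
--         raise ValueError('No database profiles configured.')
--
--     if requested is None:
--         return next(iter(profiles.keys()))
--
--     candidate = requested.strip().lower()
--     for name in profiles:
--         if name.lower() == candidate:
--             return name
--     for name, profile in profiles.items():
--         if profile['database'].lower() == candidate:
--             return name
--     raise ValueError(f'Unknown default_database "{requested}".')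
-- ===== SOURCE B (Python) =====
-- def _resolve_default_name(
--     requested: str | None,
--     profiles: dict[str, dict[str, str]],
-- ) -> str:
--     # Single pass: return a key match immediately; remember the first database match.
--     if not profiles:
--         raise ValueError('No database profiles configured.')
--
--     if requested is None:
--         return next(iter(profiles))
--
--     candidate = requested.strip().lower()
--     db_match = None
--     for name, profile in profiles.items():
--         if name.lower() == candidate:
--             return name
--         if db_match is None and profile.get('database', '').lower() == candidate:
--             db_match = name
--     if db_match is not None:
--         return db_match
--     raise ValueError(f'Unknown default_database "{requested}".')
-- ===== Notes on version B (the rewrite author's own statement) =====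
-- stated objective: alternative
-- what changed: Replaced A's two successive passes over the profiles (key pass, then database pass) by a single pass that returns a key match immediately while remembering the first database match in a local variable.
import Mathlib
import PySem

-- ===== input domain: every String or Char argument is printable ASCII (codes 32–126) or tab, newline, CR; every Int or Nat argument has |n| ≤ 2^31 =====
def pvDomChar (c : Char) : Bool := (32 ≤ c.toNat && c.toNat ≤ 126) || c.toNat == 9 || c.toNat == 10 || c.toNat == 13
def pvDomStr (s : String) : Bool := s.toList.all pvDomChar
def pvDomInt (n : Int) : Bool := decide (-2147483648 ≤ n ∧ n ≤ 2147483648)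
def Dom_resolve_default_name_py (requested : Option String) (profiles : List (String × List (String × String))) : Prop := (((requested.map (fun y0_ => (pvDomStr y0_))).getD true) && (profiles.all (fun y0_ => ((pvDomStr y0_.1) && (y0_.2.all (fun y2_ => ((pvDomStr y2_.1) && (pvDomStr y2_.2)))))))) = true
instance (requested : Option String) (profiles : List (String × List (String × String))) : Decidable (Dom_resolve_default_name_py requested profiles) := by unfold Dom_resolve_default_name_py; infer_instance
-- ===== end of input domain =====

-- B resolves the name in ONE pass over the profiles (key match returns at once, first
-- database match is remembered) instead of A's two successive passes; objective: alternative.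

-- ===== PORT A =====
-- first pass of A: first profile key whose lowercase equals candidate
def aFindKey (cand : String) : List (String × List (String × String)) → Option String
  | [] => none
  | (name, _) :: rest =>
      if PySem.Str.lower name = cand then some name else aFindKey cand rest

-- second pass of A: profile['database'] raises KeyError when absent (-> none, excluded by Pre_)
def aFindDb (cand : String) : List (String × List (String × String)) → Option String
  | [] => none
  | (name, profile) :: rest =>
      match (PySem.Dict.ofList profile).get? "database" with
      | none => none
      | some db => if PySem.Str.lower db = cand then some name else aFindDb cand rest

def resolve_default_name_py (requested : Option String) (profiles : List (String × List (String × String))) : String :=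
  match (PySem.Dict.ofList profiles).items with
  | [] => ""            -- raise ValueError('No database profiles configured.')
  | (first, _) :: _ =>
    match requested with
    | none => first     -- next(iter(profiles.keys()))
    | some r =>
      let cand := PySem.Str.lower (PySem.Str.strip r)
      match aFindKey cand ((PySem.Dict.ofList profiles).items) with
      | some n => n
      | none =>
        match aFindDb cand ((PySem.Dict.ofList profiles).items) with
        | some n => n
        | none => ""    -- raise KeyError / ValueError; excluded by Pre_

-- ===== PORT B =====
-- profile.get('database', '').lower()
def bDbCand (profile : List (String × String)) : String :=
  PySem.Str.lower ((PySem.Dict.ofList profile).getD "database" "")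

-- B's single loop, carrying db_match
def bScan (cand : String) (dbMatch : Option String) : List (String × List (String × String)) → Option String
  | [] => dbMatch
  | (name, profile) :: rest =>
      if PySem.Str.lower name = cand then some name
      else bScan cand (if dbMatch = none ∧ bDbCand profile = cand then some name else dbMatch) rest

def resolve_default_name_py_alt (requested : Option String) (profiles : List (String × List (String × String))) : String :=
  match (PySem.Dict.ofList profiles).items with
  | [] => ""            -- raise ValueError('No database profiles configured.')
  | (first, _) :: _ =>
    match requested with
    | none => first     -- next(iter(profiles))
    | some r =>
      match bScan (PySem.Str.lower (PySem.Str.strip r)) none ((PySem.Dict.ofList profiles).items) with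
      | some n => n
      | none => ""      -- raise ValueError; excluded by Pre_

-- ===== PRECONDITION & SPEC =====
-- Pre_ holds exactly where the Python A returns normally: profiles non-empty, and (when a name is
-- requested) either some profile key matches, or a database match occurs before any profile
-- lacking the 'database' key (otherwise A raises ValueError or KeyError).
def Pre_resolve_default_name_py (requested : Option String) (profiles : List (String × List (String × String))) : Prop :=
  profiles ≠ [] ∧
  (requested.map (fun r =>
      let items := (PySem.Dict.ofList profiles).items
      let cand := PySem.Str.lower (PySem.Str.strip r)
      items.any (fun p => PySem.Str.lower p.1 == cand) ||
      ((items.takeWhile (fun p => ((PySem.Dict.ofList p.2).get? "database").isSome)).any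
        (fun p => ((PySem.Dict.ofList p.2).get? "database").map PySem.Str.lower == some cand)))).getD true = true
instance (requested : Option String) (profiles : List (String × List (String × String))) : Decidable (Pre_resolve_default_name_py requested profiles) := by unfold Pre_resolve_default_name_py; infer_instance

def pvWitness_resolve_default_name_py : Option String × (List (String × List (String × String))) :=
  (some " Main ", [("other", [("database", "x")]), ("main", [("database", "db1")])])

def Spec_resolve_default_name_py (requested : Option String) (profiles : List (String × List (String × String))) (out : String) : Prop := out = resolve_default_name_py_alt requested profiles
instance (requested : Option String) (profiles : List (String × List (String × String))) (out : String) : Decidable (Spec_resolve_default_name_py requested profiles out) := by unfold Spec_resolve_default_name_py; infer_instance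

-- ===== CLAIM (what is proved, stated in full; the proofs are below) =====
def Claim_equal_resolve_default_name_py : Prop := ∀ (requested : Option String) (profiles : List (String × List (String × String))), Dom_resolve_default_name_py requested profiles → Pre_resolve_default_name_py requested profiles → Spec_resolve_default_name_py requested profiles (resolve_default_name_py requested profiles)

-- ===== LEMMAS AND PROOFS =====

-- a key match makes B return it at once, whatever db_match holds
lemma bScan_of_findKey_some (cand : String) (l : List (String × List (String × String))) (n : String)
    (h : aFindKey cand l = some n) (acc : Option String) : bScan cand acc l = some n := by
  induction l generalizing acc with
  | nil => simp [aFindKey] at h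
  | cons p rest ih =>
    obtain ⟨name, profile⟩ := p
    by_cases hk : PySem.Str.lower name = cand
    · simp only [aFindKey, if_pos hk] at h
      simpa [bScan, hk] using h
    · simp only [aFindKey, if_neg hk] at h
      simp only [bScan, if_neg hk]
      exact ih h _

-- with no key match anywhere, a recorded db_match survives to the end
lemma bScan_keeps_acc (cand : String) (l : List (String × List (String × String))) (m : String)
    (h : aFindKey cand l = none) : bScan cand (some m) l = some m := by
  induction l with
  | nil => rfl
  | cons p rest ih =>
    obtain ⟨name, profile⟩ := p
    by_cases hk : PySem.Str.lower name = cand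
    · simp [aFindKey, hk] at h
    · simp only [aFindKey, if_neg hk] at h
      simp only [bScan, if_neg hk]
      rw [if_neg (by simp)]
      exact ih h

-- with no key match, B's loop finds exactly A's second-pass result
lemma bScan_of_findDb_some (cand : String) (l : List (String × List (String × String))) (n : String)
    (hk : aFindKey cand l = none) (hd : aFindDb cand l = some n) : bScan cand none l = some n := by
  induction l with
  | nil => simp [aFindDb] at hd
  | cons p rest ih =>
    obtain ⟨name, profile⟩ := p
    by_cases h1 : PySem.Str.lower name = cand
    · simp [aFindKey, h1] at hk
    · simp only [aFindKey, if_neg h1] at hk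
      simp only [aFindDb] at hd
      simp only [bScan, if_neg h1]
      cases hg : (PySem.Dict.ofList profile).get? "database" with
      | none => rw [hg] at hd; simp at hd
      | some db =>
        rw [hg] at hd
        have hbd : bDbCand profile = PySem.Str.lower db := by
          simp [bDbCand, PySem.Dict.getD_eq_get?_getD, hg]
        by_cases hm : PySem.Str.lower db = cand
        · have hn : name = n := by simpa [hm] using hd
          subst hn
          rw [if_pos (by exact ⟨trivial, hbd.trans hm⟩)]
          exact bScan_keeps_acc cand rest name hk
        · have hd' : aFindDb cand rest = some n := by simpa [hm] using hd
          rw [if_neg (by simp [hbd, hm])]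
          exact ih hk hd'

-- a key-match certificate contradicts aFindKey = none
lemma findKey_none_no_any (cand : String) (l : List (String × List (String × String)))
    (h : aFindKey cand l = none) : l.any (fun p => PySem.Str.lower p.1 == cand) = false := by
  induction l with
  | nil => rfl
  | cons p rest ih =>
    obtain ⟨name, profile⟩ := p
    by_cases hk : PySem.Str.lower name = cand
    · simp [aFindKey, hk] at h
    · simp only [aFindKey, if_neg hk] at h
      simp [List.any_cons, hk, ih h]

-- a database match inside the all-keys-present prefix makes A's second pass succeed
lemma findDb_some_of_any (cand : String) (l : List (String × List (String × String)))
    (h : (l.takeWhile (fun p => ((PySem.Dict.ofList p.2).get? "database").isSome)).any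
          (fun p => ((PySem.Dict.ofList p.2).get? "database").map PySem.Str.lower == some cand) = true) :
    ∃ n, aFindDb cand l = some n := by
  induction l with
  | nil => simp at h
  | cons p rest ih =>
    obtain ⟨name, profile⟩ := p
    cases hg : (PySem.Dict.ofList profile).get? "database" with
    | none => rw [List.takeWhile_cons] at h; simp [hg] at h
    | some db =>
      rw [List.takeWhile_cons] at h
      simp only [hg, Option.isSome_some, if_pos] at h
      simp only [List.any_cons, hg, Bool.or_eq_true] at h
      simp only [aFindDb, hg]
      by_cases hm : PySem.Str.lower db = cand
      · exact ⟨name, by simp [hm]⟩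
      · have hrest : (rest.takeWhile (fun p => ((PySem.Dict.ofList p.2).get? "database").isSome)).any
            (fun p => ((PySem.Dict.ofList p.2).get? "database").map PySem.Str.lower == some cand) = true := by
          rcases h with h | h
          · exfalso; apply hm; simpa using h
          · exact h
        obtain ⟨n, hn⟩ := ih hrest
        exact ⟨n, by simp [hm, hn]⟩

-- ===== VERDICT (by name: the statement is the Claim_ definition above) =====
theorem resolve_default_name_py_spec : Claim_equal_resolve_default_name_py := by
  intro requested profiles _ hpre
  obtain ⟨-, hreq⟩ := hpre
  unfold Spec_resolve_default_name_py resolve_default_name_py resolve_default_name_py_alt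
  cases hitems : (PySem.Dict.ofList profiles).items with
  | nil => rfl
  | cons p rest =>
    obtain ⟨first, prof⟩ := p
    cases requested with
    | none => rfl
    | some r =>
      simp only [Option.map_some, Option.getD_some, hitems] at hreq
      dsimp only
      set cand := PySem.Str.lower (PySem.Str.strip r) with hcand
      cases hk : aFindKey cand ((first, prof) :: rest) with
      | some n =>
        rw [bScan_of_findKey_some cand _ n hk none]
      | none =>
        have hany := findKey_none_no_any cand _ hk
        rw [hany] at hreq
        simp only [Bool.false_or] at hreq
        obtain ⟨n, hn⟩ := findDb_some_of_any cand _ hreq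
        rw [hn, bScan_of_findDb_some cand _ n hk hn]
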